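-- pv_equiv track=rewrite | github.com/ysknsid25/atcoder | src/2025/ABC288-C.py | minimum_edges_to_remove
-- ===== SOURCE A (Python) =====
-- class UnionFind:
--     def __init__(self, n):
--         self.parent = list(range(n))
--         self.rank = [0] * n
--
--     def find(self, x):
--         if self.parent[x] != x:
--             self.parent[x] = self.find(self.parent[x])
--         return self.parent[x]
--
--     def union(self, x, y):
--         root_x = self.find(x)
--         root_y = self.find(y)
--
--         if root_x != root_y:
--             if self.rank[root_x] > self.rank[root_y]:
--                 self.parent[root_y] = root_x
--             elif self.rank[root_x] < self.rank[root_y]: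
--                 self.parent[root_x] = root_y
--             else:
--                 self.parent[root_y] = root_x
--                 self.rank[root_x] += 1
--             return True
--         return False
--
-- def minimum_edges_to_remove(N, M, edges):
--     uf = UnionFind(N)
--     edges_to_remove = 0
--
--     for a, b in edges:
--         # Convert to 0-based index
--         a -= 1
--         b -= 1
--         if not uf.union(a, b):
--             edges_to_remove += 1
--
--     return edges_to_remove
-- ===== SOURCE B (Python) =====
-- def minimum_edges_to_remove(N, M, edges):
--     # Label-propagation connectivity: comp[v] is the current component label of v.
--     # An edge is redundant iff its endpoints already share a label; otherwise the
--     # two labels are merged by a single relabelling pass over comp.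
--     comp = list(range(N))
--     removed = 0
--     for a, b in edges:
--         ca = comp[a - 1]
--         cb = comp[b - 1]
--         if ca == cb:
--             removed += 1
--         else:
--             comp = [ca if c == cb else c for c in comp]
--     return removed
-- ===== Notes on version B (the rewrite author's own statement) =====
-- stated objective: simpler
-- what changed: Replaces the recursive path-compressing, rank-based union-find with a flat component-label array: an edge is redundant iff its endpoints already share a label, otherwise one relabelling pass merges the two labels.
import Mathlib
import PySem

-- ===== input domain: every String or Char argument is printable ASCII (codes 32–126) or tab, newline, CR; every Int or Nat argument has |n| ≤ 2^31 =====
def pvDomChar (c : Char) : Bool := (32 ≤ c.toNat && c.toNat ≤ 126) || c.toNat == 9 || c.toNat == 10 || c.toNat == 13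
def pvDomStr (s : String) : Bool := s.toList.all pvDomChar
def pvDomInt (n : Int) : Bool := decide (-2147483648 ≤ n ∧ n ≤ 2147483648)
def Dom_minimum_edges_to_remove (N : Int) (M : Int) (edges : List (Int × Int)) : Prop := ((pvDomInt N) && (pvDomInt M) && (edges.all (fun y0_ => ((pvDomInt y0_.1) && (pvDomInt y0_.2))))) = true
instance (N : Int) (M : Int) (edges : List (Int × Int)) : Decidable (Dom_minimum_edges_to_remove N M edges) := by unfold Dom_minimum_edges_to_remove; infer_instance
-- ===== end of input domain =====

-- B replaces A's recursive path-compressing rank union-find by a flat component-label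
-- array with a relabelling pass per merging edge (objective: simpler; not faster).

-- ===== PORT A =====
-- UnionFind.find with path compression; fuel (length+1) only makes the Python recursion
-- structurally total — under Pre_ the fuel is never exhausted (proved below).
def ufFind : Nat → List Int → Int → List Int × Int
  | 0, parent, x => (parent, x)
  | fuel+1, parent, x =>
    let px := PySem.List.pyGetD parent x 0
    if px ≠ x then
      let pr := ufFind fuel parent px
      let parent' := PySem.List.pySetD pr.1 x pr.2
      (parent', PySem.List.pyGetD parent' x 0)
    else (parent, px)

-- UnionFind.union (rank heuristic kept verbatim)
def ufUnion (parent : List Int) (rank : List Int) (x y : Int) : List Int × List Int × Bool :=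
  let f1 := ufFind (parent.length + 1) parent x
  let f2 := ufFind (f1.1.length + 1) f1.1 y
  let rootX := f1.2
  let rootY := f2.2
  if rootX ≠ rootY then
    let rkx := PySem.List.pyGetD rank rootX 0
    let rky := PySem.List.pyGetD rank rootY 0
    if rkx > rky then (PySem.List.pySetD f2.1 rootY rootX, rank, true)
    else if rkx < rky then (PySem.List.pySetD f2.1 rootX rootY, rank, true)
    else (PySem.List.pySetD f2.1 rootY rootX, PySem.List.pySetD rank rootX (rkx + 1), true)
  else (f2.1, rank, false)

-- one iteration of A's loop body: a -= 1; b -= 1; if not union(a,b): count += 1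
def ufStep (s : List Int × List Int × Int) (e : Int × Int) : List Int × List Int × Int :=
  let u := ufUnion s.1 s.2.1 (e.1 - 1) (e.2 - 1)
  (u.1, u.2.1, if u.2.2 then s.2.2 else s.2.2 + 1)

def minimum_edges_to_remove (N : Int) (M : Int) (edges : List (Int × Int)) : Int :=
  (edges.foldl ufStep (PySem.List.pyRange 0 N 1, List.replicate N.toNat 0, 0)).2.2

-- ===== PORT B =====
-- one iteration of B's loop body: compare the two labels; on a merge, relabel cb-vertices to ca
def compStep (s : List Int × Int) (e : Int × Int) : List Int × Int :=
  let ca := PySem.List.pyGetD s.1 (e.1 - 1) 0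
  let cb := PySem.List.pyGetD s.1 (e.2 - 1) 0
  if ca = cb then (s.1, s.2 + 1)
  else (s.1.map (fun c => if c = cb then ca else c), s.2)

def minimum_edges_to_remove_alt (N : Int) (M : Int) (edges : List (Int × Int)) : Int :=
  (edges.foldl compStep (PySem.List.pyRange 0 N 1, 0)).2

-- ===== PRECONDITION & SPEC =====
-- Pre_ is exactly where A returns: each endpoint must index into the N parent slots
-- (Python's negative wrap admits 1-N ≤ v ≤ N; for N < 0 this forces edges = []);
-- outside, A raises IndexError.
def Pre_minimum_edges_to_remove (N : Int) (M : Int) (edges : List (Int × Int)) : Prop :=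
  ∀ e ∈ edges, (1 - N ≤ e.1 ∧ e.1 ≤ N) ∧ (1 - N ≤ e.2 ∧ e.2 ≤ N)
instance (N : Int) (M : Int) (edges : List (Int × Int)) : Decidable (Pre_minimum_edges_to_remove N M edges) := by unfold Pre_minimum_edges_to_remove; infer_instance

def pvWitness_minimum_edges_to_remove : Int × Int × (List (Int × Int)) := (3, 3, [(1, 2), (2, 3), (1, 3)])

def Spec_minimum_edges_to_remove (N : Int) (M : Int) (edges : List (Int × Int)) (out : Int) : Prop := out = minimum_edges_to_remove_alt N M edges
instance (N : Int) (M : Int) (edges : List (Int × Int)) (out : Int) : Decidable (Spec_minimum_edges_to_remove N M edges out) := by unfold Spec_minimum_edges_to_remove; infer_instance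

-- ===== CLAIM (what is proved, stated in full; the proofs are below) =====
def Claim_equal_minimum_edges_to_remove : Prop := ∀ (N : Int) (M : Int) (edges : List (Int × Int)), Dom_minimum_edges_to_remove N M edges → Pre_minimum_edges_to_remove N M edges → Spec_minimum_edges_to_remove N M edges (minimum_edges_to_remove N M edges)

-- ===== LEMMAS AND PROOFS =====

-- pure model of the parent array: one pointer step, and the root by fueled iteration
def stp (p : List Int) (x : Nat) : Nat := (p.getD x 0).toNat

def rootGo (p : List Int) : Nat → Nat → Nat
  | 0, x => x
  | fuel+1, x => if stp p x = x then x else rootGo p fuel (stp p x)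

def rootN (p : List Int) (x : Nat) : Nat := rootGo p p.length x

def ValidUF (p : List Int) : Prop := ∀ i, i < p.length → 0 ≤ p.getD i 0 ∧ p.getD i 0 < (p.length : Int)

def DecrUF (p : List Int) (d : Nat → Nat) : Prop := ∀ i, i < p.length → stp p i ≠ i → d (stp p i) < d i

def GoodUF (p : List Int) : Prop := ValidUF p ∧ ∃ d, DecrUF p d

def wrapIdx (n : Nat) (i : Int) : Nat := if i < 0 then (i + n).toNat else i.toNat

lemma pyGetD_wrap (xs : List Int) (i d : Int) (h1 : -(xs.length : Int) ≤ i) (h2 : i < xs.length) :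
    PySem.List.pyGetD xs i d = xs.getD (wrapIdx xs.length i) d := by
  unfold wrapIdx
  by_cases h0 : i < 0
  · have h : xs.length - (-i).toNat = (i + xs.length).toNat := by omega
    simp only [PySem.List.pyGetD, PySem.List.pyGet?, PySem.List.pyIdx?, List.getD_eq_getElem?_getD,
      if_pos h0]
    split_ifs <;> (try (exfalso; omega)) <;> simp_all
  · simp only [if_neg h0]
    have hi : i = ((i.toNat : Nat) : Int) := by omega
    rw [hi, PySem.List.pyGetD_natCast, Int.toNat_natCast]

lemma pySetD_wrap (xs : List Int) (i v : Int) (h1 : -(xs.length : Int) ≤ i) (h2 : i < xs.length) :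
    PySem.List.pySetD xs i v = xs.set (wrapIdx xs.length i) v := by
  unfold wrapIdx
  by_cases h0 : i < 0
  · have h : xs.length - (-i).toNat = (i + xs.length).toNat := by omega
    simp only [PySem.List.pySetD, PySem.List.pySet?, PySem.List.pyIdx?, if_pos h0]
    split_ifs <;> (try (exfalso; omega)) <;> simp_all
  · simp only [if_neg h0]
    exact PySem.List.pySetD_of_nonneg xs v (by omega)

lemma getD_set_uf (p : List Int) (y : Nat) (v : Int) (z : Nat) (hy : y < p.length) :
    (p.set y v).getD z 0 = if z = y then v else p.getD z 0 := by
  simp only [List.getD_eq_getElem?_getD, List.getElem?_set]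
  by_cases h1 : y = z
  · subst h1
    simp [hy]
  · have h2 : z ≠ y := fun hh => h1 hh.symm
    simp [h1, h2]

lemma stp_lt (p : List Int) (hV : ValidUF p) {i : Nat} (hi : i < p.length) : stp p i < p.length := by
  have := hV i hi
  unfold stp
  omega

lemma iter_lt (p : List Int) (hV : ValidUF p) {u : Nat} (hu : u < p.length) (k : Nat) :
    (stp p)^[k] u < p.length := by
  induction k generalizing u with
  | zero => simpa
  | succ k ih =>
    rw [Function.iterate_succ_apply]
    exact ih (stp_lt p hV hu)

lemma exists_hits (p : List Int) (hV : ValidUF p) {d : Nat → Nat} (hd : DecrUF p d)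
    {u : Nat} (hu : u < p.length) :
    ∃ k, k < p.length ∧ stp p ((stp p)^[k] u) = (stp p)^[k] u := by
  by_contra hcon
  push Not at hcon
  have hmono : ∀ j, j ≤ p.length → ∀ i, i < j → d ((stp p)^[j] u) < d ((stp p)^[i] u) := by
    intro j
    induction j with
    | zero => omega
    | succ j ih =>
      intro hj i hi
      have hlt : d ((stp p)^[j+1] u) < d ((stp p)^[j] u) := by
        rw [Function.iterate_succ_apply']
        exact hd _ (iter_lt p hV hu j) (hcon j (by omega))
      rcases Nat.lt_or_ge i j with hij | hij
      · exact lt_trans hlt (ih (by omega) i hij)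
      · have hieq : i = j := by omega
        subst hieq
        exact hlt
  have hinj : Function.Injective
      (fun k : Fin (p.length + 1) => (⟨(stp p)^[k.val] u, iter_lt p hV hu k.val⟩ : Fin p.length)) := by
    intro i j hij
    simp only [Fin.mk.injEq] at hij
    by_contra hne
    have hvne : i.val ≠ j.val := fun hv => hne (Fin.ext hv)
    rcases Nat.lt_or_ge i.val j.val with hlt | hge
    · have hm := hmono j.val (Nat.lt_succ_iff.mp j.isLt) i.val hlt
      rw [hij] at hm
      exact absurd hm (lt_irrefl _)
    · have hm := hmono i.val (Nat.lt_succ_iff.mp i.isLt) j.val (by omega)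
      rw [hij] at hm
      exact absurd hm (lt_irrefl _)
  have hcard := Fintype.card_le_of_injective _ hinj
  simp only [Fintype.card_fin] at hcard
  omega

lemma rootGo_fixed (p : List Int) {u : Nat} (h : stp p u = u) (fuel : Nat) : rootGo p fuel u = u := by
  cases fuel with
  | zero => rfl
  | succ f => simp [rootGo, h]

lemma rootGo_stable (p : List Int) :
    ∀ (k : Nat) (x : Nat), stp p ((stp p)^[k] x) = (stp p)^[k] x →
      ∀ f1 f2, k ≤ f1 → k ≤ f2 → rootGo p f1 x = rootGo p f2 x := by
  intro k
  induction k with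
  | zero =>
    intro x hx f1 f2 _ _
    simp only [Function.iterate_zero, id] at hx
    rw [rootGo_fixed p hx, rootGo_fixed p hx]
  | succ k ih =>
    intro x hx f1 f2 h1 h2
    by_cases hfix : stp p x = x
    · rw [rootGo_fixed p hfix, rootGo_fixed p hfix]
    · obtain ⟨f1', rfl⟩ : ∃ f, f1 = f + 1 := ⟨f1 - 1, by omega⟩
      obtain ⟨f2', rfl⟩ : ∃ f, f2 = f + 1 := ⟨f2 - 1, by omega⟩
      rw [Function.iterate_succ_apply] at hx
      simp only [rootGo, if_neg hfix]
      exact ih (stp p x) hx f1' f2' (by omega) (by omega)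

lemma rootGo_hits_fixed (p : List Int) :
    ∀ (k : Nat) (x : Nat), stp p ((stp p)^[k] x) = (stp p)^[k] x →
      stp p (rootGo p k x) = rootGo p k x := by
  intro k
  induction k with
  | zero => intro x hx; simpa using hx
  | succ k ih =>
    intro x hx
    by_cases hfix : stp p x = x
    · simp [rootGo, hfix]
    · rw [Function.iterate_succ_apply] at hx
      simp only [rootGo, if_neg hfix]
      exact ih (stp p x) hx

lemma root_fixed (p : List Int) (hV : ValidUF p) {d : Nat → Nat} (hd : DecrUF p d)
    {u : Nat} (hu : u < p.length) : stp p (rootN p u) = rootN p u := by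
  obtain ⟨k, hk, hfix⟩ := exists_hits p hV hd hu
  unfold rootN
  rw [rootGo_stable p k u hfix p.length k (by omega) le_rfl]
  exact rootGo_hits_fixed p k u hfix

lemma rootGo_lt (p : List Int) (hV : ValidUF p) :
    ∀ (fuel u : Nat), u < p.length → rootGo p fuel u < p.length := by
  intro fuel
  induction fuel with
  | zero => intro u hu; simpa using hu
  | succ f ih =>
    intro u hu
    by_cases hfix : stp p u = u
    · simpa [rootGo, hfix]
    · simp only [rootGo, if_neg hfix]
      exact ih _ (stp_lt p hV hu)

lemma root_lt (p : List Int) (hV : ValidUF p) {u : Nat} (hu : u < p.length) : rootN p u < p.length := by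
  exact rootGo_lt p hV p.length u hu

lemma root_next (p : List Int) (hV : ValidUF p) {d : Nat → Nat} (hd : DecrUF p d)
    {u : Nat} (hu : u < p.length) : rootN p (stp p u) = rootN p u := by
  by_cases hfix : stp p u = u
  · rw [hfix]
  · have hl : 0 < p.length := by omega
    obtain ⟨k, hk, hhit⟩ := exists_hits p hV hd (stp_lt p hV hu)
    unfold rootN
    obtain ⟨f, hf⟩ : ∃ f, p.length = f + 1 := ⟨p.length - 1, by omega⟩
    conv_rhs => rw [hf]
    simp only [rootGo, if_neg hfix]
    exact rootGo_stable p k (stp p u) hhit p.length f (by omega) (by omega)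

lemma d_root_lt (p : List Int) (hV : ValidUF p) {d : Nat → Nat} (hd : DecrUF p d)
    {u : Nat} (hu : u < p.length) (hne : rootN p u ≠ u) : d (rootN p u) < d u := by
  suffices H : ∀ m u, u < p.length → d u ≤ m → rootN p u ≠ u → d (rootN p u) < d u by
    exact H (d u) u hu le_rfl hne
  intro m
  induction m with
  | zero =>
    intro u hu hd0 hne
    by_cases hfix : stp p u = u
    · exact absurd (rootGo_fixed p hfix p.length) hne
    · have := hd u hu hfix; omega
  | succ m ih =>
    intro u hu hdm hne
    by_cases hfix : stp p u = u
    · exact absurd (rootGo_fixed p hfix p.length) hne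
    · have hstep : d (stp p u) < d u := hd u hu hfix
      have hroot : rootN p (stp p u) = rootN p u := root_next p hV hd hu
      by_cases h2 : rootN p (stp p u) = stp p u
      · rw [← hroot, h2]; omega
      · have := ih (stp p u) (stp_lt p hV hu) (by omega) h2
        rw [← hroot]; omega

-- path compression step: setting any vertex's parent to its root preserves everything
lemma compress_spec (p : List Int) (hV : ValidUF p) {d : Nat → Nat} (hd : DecrUF p d)
    {y : Nat} (hy : y < p.length) :
    (p.set y ((rootN p y : Nat) : Int)).length = p.length ∧
    ValidUF (p.set y ((rootN p y : Nat) : Int)) ∧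
    DecrUF (p.set y ((rootN p y : Nat) : Int)) d ∧
    ∀ z, z < p.length → rootN (p.set y ((rootN p y : Nat) : Int)) z = rootN p z := by
  set r' := ((rootN p y : Nat) : Int) with hr'
  have hlen : (p.set y r').length = p.length := by simp
  have hgetD : ∀ z, (p.set y r').getD z 0 = if z = y then r' else p.getD z 0 :=
    fun z => getD_set_uf p y r' z hy
  have hstp : ∀ z, stp (p.set y r') z = if z = y then rootN p y else stp p z := by
    intro z
    unfold stp
    rw [hgetD]
    split_ifs
    · simp [hr']
    · rfl
  have hrlt : rootN p y < p.length := root_lt p hV hy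
  have hV' : ValidUF (p.set y r') := by
    intro i hi
    rw [hlen] at hi
    rw [hgetD, hlen]
    split_ifs
    · constructor
      · simp only [hr']
        positivity
      · simp only [hr']
        exact_mod_cast hrlt
    · exact hV i hi
  have hd' : DecrUF (p.set y r') d := by
    intro i hi hne
    rw [hlen] at hi
    rw [hstp] at hne ⊢
    split_ifs at hne ⊢ with hiy
    · subst hiy
      exact d_root_lt p hV hd hy hne
    · exact hd i hi hne
  refine ⟨hlen, hV', hd', ?_⟩
  have hfix' : ∀ w, stp (p.set y r') w = w → rootN (p.set y r') w = w := by
    intro w hw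
    unfold rootN
    exact rootGo_fixed _ hw _
  suffices H : ∀ m z, z < p.length → d z ≤ m → rootN (p.set y r') z = rootN p z by
    intro z hz; exact H (d z) z hz le_rfl
  intro m
  induction m with
  | zero =>
    intro z hz hdz
    by_cases hzy : z = y
    · subst hzy
      by_cases hroot : rootN p z = z
      · rw [hfix' z (by rw [hstp]; simp [hroot])]
        exact hroot.symm
      · exact absurd (d_root_lt p hV hd hz hroot) (by omega)
    · by_cases hf : stp p z = z
      · rw [hfix' z (by rw [hstp]; simp [hzy, hf])]
        unfold rootN
        exact (rootGo_fixed p hf _).symm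
      · exact absurd (hd z hz hf) (by omega)
  | succ m ih =>
    intro z hz hdz
    by_cases hzy : z = y
    · subst hzy
      by_cases hroot : rootN p z = z
      · rw [hfix' z (by rw [hstp]; simp [hroot])]
        exact hroot.symm
      · have h1 : rootN (p.set z r') z = rootN (p.set z r') (stp (p.set z r') z) :=
          (root_next _ hV' hd' (by rwa [hlen])).symm
        rw [h1, hstp]
        simp only [eq_self_iff_true, if_true]
        rw [hfix' (rootN p z) (by rw [hstp]; simp [hroot, root_fixed p hV hd hz])]
    · by_cases hf : stp p z = z
      · rw [hfix' z (by rw [hstp]; simp [hzy, hf])]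
        unfold rootN
        exact (rootGo_fixed p hf _).symm
      · have h1 : rootN (p.set y r') z = rootN (p.set y r') (stp (p.set y r') z) :=
          (root_next _ hV' hd' (by rwa [hlen])).symm
        rw [h1, hstp]
        simp only [if_neg hzy]
        rw [ih (stp p z) (stp_lt p hV hz) (by have := hd z hz hf; omega)]
        exact root_next p hV hd hz

-- union step: linking root rt under root rx redirects exactly the rt-class to rx
lemma link_spec (p : List Int) (hV : ValidUF p) {d : Nat → Nat} (hd : DecrUF p d)
    {rt rx : Nat} (hrt : rt < p.length) (hrx : rx < p.length)
    (hfet : stp p rt = rt) (hfex : stp p rx = rx) (hne : rt ≠ rx) :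
    (p.set rt ((rx : Nat) : Int)).length = p.length ∧
    GoodUF (p.set rt ((rx : Nat) : Int)) ∧
    ∀ z, z < p.length → rootN (p.set rt ((rx : Nat) : Int)) z = if rootN p z = rt then rx else rootN p z := by
  have hlen : (p.set rt ((rx : Nat) : Int)).length = p.length := by simp
  have hgetD : ∀ z, (p.set rt ((rx : Nat) : Int)).getD z 0 =
      if z = rt then ((rx : Nat) : Int) else p.getD z 0 :=
    fun z => getD_set_uf p rt _ z hrt
  have hstp : ∀ z, stp (p.set rt ((rx : Nat) : Int)) z = if z = rt then rx else stp p z := by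
    intro z
    unfold stp
    rw [hgetD]
    split_ifs
    · simp
    · rfl
  have hroot_rt : rootN p rt = rt := rootGo_fixed p hfet _
  have hroot_rx : rootN p rx = rx := rootGo_fixed p hfex _
  have hV' : ValidUF (p.set rt ((rx : Nat) : Int)) := by
    intro i hi
    rw [hlen] at hi
    rw [hgetD, hlen]
    split_ifs
    · constructor <;> [positivity; exact_mod_cast hrx]
    · exact hV i hi
  have hd' : DecrUF (p.set rt ((rx : Nat) : Int))
      (fun z => if rootN p z = rt then d z + d rx + 1 else d z) := by
    intro i hi hne
    rw [hlen] at hi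
    simp only [hstp] at hne ⊢
    by_cases hirt : i = rt
    · rw [hirt] at hne ⊢
      simp only [eq_self_iff_true, if_true] at hne ⊢
      rw [hroot_rx, hroot_rt, if_neg hne, if_pos rfl]
      omega
    · simp only [if_neg hirt] at hne ⊢
      rw [root_next p hV hd hi]
      have := hd i hi hne
      split_ifs <;> omega
  refine ⟨hlen, ⟨hV', _, hd'⟩, ?_⟩
  have hfix' : ∀ w, stp (p.set rt ((rx : Nat) : Int)) w = w →
      rootN (p.set rt ((rx : Nat) : Int)) w = w := by
    intro w hw
    unfold rootN
    exact rootGo_fixed _ hw _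
  have hrxfix' : rootN (p.set rt ((rx : Nat) : Int)) rx = rx := by
    refine hfix' rx ?_
    rw [hstp, if_neg (Ne.symm hne)]
    exact hfex
  suffices H : ∀ m z, z < p.length → (if rootN p z = rt then d z + d rx + 1 else d z) ≤ m →
      rootN (p.set rt ((rx : Nat) : Int)) z = if rootN p z = rt then rx else rootN p z by
    intro z hz; exact H _ z hz le_rfl
  intro m
  induction m with
  | zero =>
    intro z hz hdz
    by_cases hzrt : z = rt
    · subst hzrt
      split_ifs at hdz
      omega
    · by_cases hf : stp p z = z
      · have hzr : rootN p z = z := rootGo_fixed p hf _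
        rw [hfix' z (by rw [hstp, if_neg hzrt]; exact hf), if_neg (by rw [hzr]; exact hzrt)]
        exact hzr.symm
      · have := hd z hz hf
        split_ifs at hdz <;> omega
  | succ m ih =>
    intro z hz hdz
    by_cases hzrt : z = rt
    · subst hzrt
      have h1 := (root_next _ hV' hd' (show z < (p.set z ((rx : Nat) : Int)).length by rwa [hlen])).symm
      rw [h1, hstp]
      simp only [eq_self_iff_true, if_true]
      rw [hrxfix', hroot_rt]
      simp
    · by_cases hf : stp p z = z
      · have hzr : rootN p z = z := rootGo_fixed p hf _
        rw [hfix' z (by rw [hstp, if_neg hzrt]; exact hf), if_neg (by rw [hzr]; exact hzrt)]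
        exact hzr.symm
      · have h1 := (root_next _ hV' hd' (show z < (p.set rt ((rx : Nat) : Int)).length by rwa [hlen])).symm
        rw [h1, hstp, if_neg hzrt]
        have hw : rootN p (stp p z) = rootN p z := root_next p hV hd hz
        have hstep := hd z hz hf
        rw [ih (stp p z) (stp_lt p hV hz) (by rw [hw]; split_ifs at hdz ⊢ <;> omega), hw]

lemma merge_ite_iff {α : Type} [DecidableEq α] {rA rB : α} (h : rA ≠ rB) (a b : α) :
    ((if a = rB then rA else a) = (if b = rB then rA else b)) ↔
      (a = b ∨ ((a = rA ∨ a = rB) ∧ (b = rA ∨ b = rB))) := by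
  by_cases ha : a = rB <;> by_cases hb : b = rB <;>
    [skip; skip; skip; skip] <;> subst_vars <;>
    constructor <;> intro hx <;> simp_all <;>
    (try tauto) <;> rcases hx with hx | ⟨hh1, hh2⟩ <;> simp_all

-- find: returns the root, keeps the state good, preserves all roots
lemma find_go (p : List Int) (hV : ValidUF p) {d : Nat → Nat} (hd : DecrUF p d) :
    ∀ (k u fuel : Nat), u < p.length → stp p ((stp p)^[k] u) = (stp p)^[k] u → k < fuel →
      (ufFind fuel p ((u : Nat) : Int)).2 = ((rootN p u : Nat) : Int) ∧
      (ufFind fuel p ((u : Nat) : Int)).1.length = p.length ∧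
      GoodUF (ufFind fuel p ((u : Nat) : Int)).1 ∧
      ∀ z, z < p.length → rootN (ufFind fuel p ((u : Nat) : Int)).1 z = rootN p z := by
  have hfixed : ∀ (u f : Nat), u < p.length → stp p u = u →
      (ufFind (f + 1) p ((u : Nat) : Int)).2 = ((rootN p u : Nat) : Int) ∧
      (ufFind (f + 1) p ((u : Nat) : Int)).1.length = p.length ∧
      GoodUF (ufFind (f + 1) p ((u : Nat) : Int)).1 ∧
      ∀ z, z < p.length → rootN (ufFind (f + 1) p ((u : Nat) : Int)).1 z = rootN p z := by
    intro u f hu hfixu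
    have hpx : PySem.List.pyGetD p ((u : Nat) : Int) 0 = ((u : Nat) : Int) := by
      rw [PySem.List.pyGetD_natCast]
      have h0 := hV u hu
      unfold stp at hfixu
      omega
    simp only [ufFind, hpx]
    rw [if_neg (by simp)]
    refine ⟨?_, rfl, ⟨hV, d, hd⟩, fun z hz => rfl⟩
    unfold rootN
    rw [rootGo_fixed p hfixu]
  intro k
  induction k with
  | zero =>
    intro u fuel hu hfix hk
    obtain ⟨f, rfl⟩ : ∃ f, fuel = f + 1 := ⟨fuel - 1, by omega⟩
    simp only [Function.iterate_zero, id] at hfix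
    exact hfixed u f hu hfix
  | succ k ih =>
    intro u fuel hu hfix hk
    obtain ⟨f, rfl⟩ : ∃ f, fuel = f + 1 := ⟨fuel - 1, by omega⟩
    by_cases hfixu : stp p u = u
    · exact hfixed u f hu hfixu
    · have hpx : PySem.List.pyGetD p ((u : Nat) : Int) 0 = ((stp p u : Nat) : Int) := by
        rw [PySem.List.pyGetD_natCast]
        have h0 := hV u hu
        unfold stp
        omega
      have hne : ¬ (PySem.List.pyGetD p ((u : Nat) : Int) 0 = ((u : Nat) : Int)) := by
        rw [hpx]
        intro hc
        exact hfixu (by exact_mod_cast hc)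
      rw [Function.iterate_succ_apply] at hfix
      obtain ⟨h2a, h2b, ⟨hV₁, d₁, hd₁⟩, h2d⟩ :=
        ih (stp p u) f (stp_lt p hV hu) hfix (by omega)
      have hulen₁ : u < (ufFind f p ((stp p u : Nat) : Int)).1.length := by rw [h2b]; exact hu
      have hrootq : rootN (ufFind f p ((stp p u : Nat) : Int)).1 u = rootN p u := h2d u hu
      have hval : (ufFind f p ((stp p u : Nat) : Int)).2 =
          ((rootN (ufFind f p ((stp p u : Nat) : Int)).1 u : Nat) : Int) := by
        rw [hrootq, h2a, root_next p hV hd hu]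
      obtain ⟨h3a, h3b, h3c, h3d⟩ :=
        compress_spec (ufFind f p ((stp p u : Nat) : Int)).1 hV₁ hd₁ hulen₁
      simp only [ufFind, hpx]
      rw [if_pos (show ¬((stp p u : Nat) : Int) = ((u : Nat) : Int) from
        fun hc => hfixu (by exact_mod_cast hc))]
      simp only [hval, PySem.List.pySetD_natCast]
      have hget : ((ufFind f p ((stp p u : Nat) : Int)).1.set u
            ((rootN (ufFind f p ((stp p u : Nat) : Int)).1 u : Nat) : Int)).getD u 0 =
          ((rootN (ufFind f p ((stp p u : Nat) : Int)).1 u : Nat) : Int) := by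
        rw [getD_set_uf _ u _ u hulen₁, if_pos rfl]
      refine ⟨?_, ?_, ⟨h3b, d₁, h3c⟩, ?_⟩
      · rw [PySem.List.pyGetD_natCast, hget, hrootq]
      · rw [h3a, h2b]
      · intro z hz
        rw [h3d z (by rw [h2b]; exact hz), h2d z hz]

lemma find_int (p : List Int) (hG : GoodUF p) {x : Int}
    (h1 : -(p.length : Int) ≤ x) (h2 : x < (p.length : Int)) :
    (ufFind (p.length + 1) p x).2 = ((rootN p (wrapIdx p.length x) : Nat) : Int) ∧
    (ufFind (p.length + 1) p x).1.length = p.length ∧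
    GoodUF (ufFind (p.length + 1) p x).1 ∧
    ∀ z, z < p.length → rootN (ufFind (p.length + 1) p x).1 z = rootN p z := by
  obtain ⟨hV, d, hd⟩ := hG
  by_cases hneg : x < 0
  · -- negative index: one wrapped step, then the non-negative case
    have hlen0 : 0 < p.length := by omega
    set u : Nat := (x + p.length).toNat with hu_def
    have hu : u < p.length := by omega
    have hwrap : wrapIdx p.length x = u := by rw [wrapIdx, if_pos hneg]
    have h0 := hV u hu
    have hpx : PySem.List.pyGetD p x 0 = ((stp p u : Nat) : Int) := by
      rw [pyGetD_wrap p x 0 h1 h2, hwrap]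
      unfold stp
      omega
    have hxne : ¬ (PySem.List.pyGetD p x 0 = x) := by
      rw [hpx]
      intro hc
      omega
    obtain ⟨k, hk, hfix⟩ := exists_hits p hV hd (stp_lt p hV hu)
    obtain ⟨h2a, h2b, ⟨hV₁, d₁, hd₁⟩, h2d⟩ :=
      find_go p hV hd k (stp p u) p.length (stp_lt p hV hu) hfix hk
    have hulen₁ : u < (ufFind p.length p ((stp p u : Nat) : Int)).1.length := by
      rw [h2b]; exact hu
    have hrootq : rootN (ufFind p.length p ((stp p u : Nat) : Int)).1 u = rootN p u := h2d u hu
    have hval : (ufFind p.length p ((stp p u : Nat) : Int)).2 =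
        ((rootN (ufFind p.length p ((stp p u : Nat) : Int)).1 u : Nat) : Int) := by
      rw [hrootq, h2a, root_next p hV hd hu]
    obtain ⟨h3a, h3b, h3c, h3d⟩ :=
      compress_spec (ufFind p.length p ((stp p u : Nat) : Int)).1 hV₁ hd₁ hulen₁
    have hset : PySem.List.pySetD (ufFind p.length p ((stp p u : Nat) : Int)).1 x
          ((rootN (ufFind p.length p ((stp p u : Nat) : Int)).1 u : Nat) : Int) =
        (ufFind p.length p ((stp p u : Nat) : Int)).1.set u
          ((rootN (ufFind p.length p ((stp p u : Nat) : Int)).1 u : Nat) : Int) := by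
      rw [pySetD_wrap _ x _ (by rw [h2b]; exact h1) (by rw [h2b]; exact h2), h2b, hwrap]
    simp only [ufFind, hpx]
    rw [if_pos (by rw [← hpx]; exact hxne)]
    simp only [hval, hset]
    have hget : PySem.List.pyGetD ((ufFind p.length p ((stp p u : Nat) : Int)).1.set u
          ((rootN (ufFind p.length p ((stp p u : Nat) : Int)).1 u : Nat) : Int)) x 0 =
        ((rootN (ufFind p.length p ((stp p u : Nat) : Int)).1 u : Nat) : Int) := by
      rw [pyGetD_wrap _ x 0 (by rw [List.length_set, h2b]; exact h1)
        (by rw [List.length_set, h2b]; exact h2)]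
      rw [List.length_set, h2b, hwrap, getD_set_uf _ u _ u hulen₁, if_pos rfl]
    refine ⟨?_, ?_, ⟨h3b, d₁, h3c⟩, ?_⟩
    · rw [hget, hrootq, hwrap]
    · rw [h3a, h2b]
    · intro z hz
      rw [h3d z (by rw [h2b]; exact hz), h2d z hz]
  · -- non-negative index
    set u : Nat := x.toNat with hu_def
    have hu : u < p.length := by omega
    have hwrap : wrapIdx p.length x = u := by rw [wrapIdx, if_neg hneg]
    have hx : ((u : Nat) : Int) = x := by omega
    obtain ⟨k, hk, hfix⟩ := exists_hits p hV hd hu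
    have H := find_go p hV hd k u (p.length + 1) hu hfix (by omega)
    rw [hx] at H
    rw [hwrap]
    exact H

lemma union_spec (p rank : List Int) (hG : GoodUF p) {x y : Int}
    (hx1 : -(p.length : Int) ≤ x) (hx2 : x < (p.length : Int))
    (hy1 : -(p.length : Int) ≤ y) (hy2 : y < (p.length : Int)) :
    (ufUnion p rank x y).1.length = p.length ∧
    GoodUF (ufUnion p rank x y).1 ∧
    (ufUnion p rank x y).2.2 = decide (rootN p (wrapIdx p.length x) ≠ rootN p (wrapIdx p.length y)) ∧
    ∀ z w, z < p.length → w < p.length →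
      (rootN (ufUnion p rank x y).1 z = rootN (ufUnion p rank x y).1 w ↔
        (rootN p z = rootN p w ∨
          ((rootN p z = rootN p (wrapIdx p.length x) ∨ rootN p z = rootN p (wrapIdx p.length y)) ∧
           (rootN p w = rootN p (wrapIdx p.length x) ∨ rootN p w = rootN p (wrapIdx p.length y))))) := by
  have hwx : wrapIdx p.length x < p.length := by unfold wrapIdx; split_ifs <;> omega
  have hwy : wrapIdx p.length y < p.length := by unfold wrapIdx; split_ifs <;> omega
  obtain ⟨F1a, F1b, F1c, F1d⟩ := find_int p hG hx1 hx2
  obtain ⟨F2a, F2b, F2c, F2d⟩ := find_int (ufFind (p.length + 1) p x).1 F1c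
    (x := y) (by rw [F1b]; exact hy1) (by rw [F1b]; exact hy2)
  set q1 := (ufFind (p.length + 1) p x).1 with hq1
  set rux := rootN p (wrapIdx p.length x) with hrux
  set ruy := rootN p (wrapIdx p.length y) with hruy
  have hwy' : wrapIdx q1.length y = wrapIdx p.length y := by rw [F1b]
  have F2a' : (ufFind (q1.length + 1) q1 y).2 = ((ruy : Nat) : Int) := by
    rw [F2a, hwy', F1d _ hwy]
  set q2 := (ufFind (q1.length + 1) q1 y).1 with hq2
  have hlen2 : q2.length = p.length := by rw [F2b, F1b]
  have hR : ∀ z, z < p.length → rootN q2 z = rootN p z := by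
    intro z hz
    rw [F2d z (by rw [F1b]; exact hz), F1d z hz]
  obtain ⟨hV₂, d₂, hd₂⟩ := F2c
  have hrux_lt : rux < p.length := root_lt p hG.1 hwx
  have hruy_lt : ruy < p.length := root_lt p hG.1 hwy
  have hfix_x : stp q2 rux = rux := by
    have := root_fixed q2 hV₂ hd₂ (u := wrapIdx p.length x) (by omega)
    rwa [hR _ hwx, ← hrux] at this
  have hfix_y : stp q2 ruy = ruy := by
    have := root_fixed q2 hV₂ hd₂ (u := wrapIdx p.length y) (by omega)
    rwa [hR _ hwy, ← hruy] at this
  simp only [ufUnion, ← hq1, ← hq2, F1a, F2a']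
  by_cases hroot : rux = ruy
  · rw [if_neg (by simp [hroot])]
    refine ⟨hlen2, ⟨hV₂, d₂, hd₂⟩, by simp [hroot], ?_⟩
    intro z w hz hw
    rw [hR z hz, hR w hw]
    constructor
    · exact Or.inl
    · intro hzw
      rcases hzw with hzw | ⟨ha, hb⟩
      · exact hzw
      · rcases ha with ha | ha <;> rcases hb with hb | hb <;> simp_all
  · rw [if_pos (by exact_mod_cast hroot)]
    have hbool : decide (rux ≠ ruy) = true := by simp [hroot]
    split_ifs with hr1 hr2
    · obtain ⟨L1, L2, L3⟩ := link_spec q2 hV₂ hd₂ (rt := ruy) (rx := rux)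
        (by omega) (by omega) hfix_y hfix_x (Ne.symm hroot)
      rw [PySem.List.pySetD_natCast]
      refine ⟨by rw [L1, hlen2], L2, hbool.symm, ?_⟩
      intro z w hz hw
      rw [L3 z (by omega), L3 w (by omega), hR z hz, hR w hw]
      exact merge_ite_iff hroot _ _
    · obtain ⟨L1, L2, L3⟩ := link_spec q2 hV₂ hd₂ (rt := rux) (rx := ruy)
        (by omega) (by omega) hfix_x hfix_y hroot
      rw [PySem.List.pySetD_natCast]
      refine ⟨by rw [L1, hlen2], L2, hbool.symm, ?_⟩
      intro z w hz hw
      rw [L3 z (by omega), L3 w (by omega), hR z hz, hR w hw]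
      rw [merge_ite_iff (Ne.symm hroot) _ _]
      tauto
    · obtain ⟨L1, L2, L3⟩ := link_spec q2 hV₂ hd₂ (rt := ruy) (rx := rux)
        (by omega) (by omega) hfix_y hfix_x (Ne.symm hroot)
      rw [PySem.List.pySetD_natCast]
      refine ⟨by rw [L1, hlen2], L2, hbool.symm, ?_⟩
      intro z w hz hw
      rw [L3 z (by omega), L3 w (by omega), hR z hz, hR w hw]
      exact merge_ite_iff hroot _ _

-- the coupling invariant between A's union-find state and B's label array
def InvAB (n : Nat) (parent comp : List Int) : Prop :=
  parent.length = n ∧ comp.length = n ∧ GoodUF parent ∧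
  ∀ z w, z < n → w < n → (rootN parent z = rootN parent w ↔ comp.getD z 0 = comp.getD w 0)

lemma loop_eq (n : Nat) : ∀ (edges : List (Int × Int)) (parent rank comp : List Int) (c : Int),
    InvAB n parent comp →
    (∀ e ∈ edges, (1 - (n : Int) ≤ e.1 ∧ e.1 ≤ (n : Int)) ∧ (1 - (n : Int) ≤ e.2 ∧ e.2 ≤ (n : Int))) →
    (edges.foldl ufStep (parent, rank, c)).2.2 = (edges.foldl compStep (comp, c)).2 := by
  intro edges
  induction edges with
  | nil =>
    intro parent rank comp c _ _
    rfl
  | cons e rest ih =>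
    rcases e with ⟨a, b⟩
    intro parent rank comp c hInv hb
    obtain ⟨hplen, hclen, hGood, hrel⟩ := hInv
    obtain ⟨⟨ha1, ha2⟩, hb1, hb2⟩ := hb (a, b) List.mem_cons_self
    have hrest := fun e he => hb e (List.mem_cons_of_mem _ he)
    have hn : 0 < n := by omega
    have hx1 : -(parent.length : Int) ≤ a - 1 := by rw [hplen]; omega
    have hx2 : a - 1 < (parent.length : Int) := by rw [hplen]; omega
    have hy1 : -(parent.length : Int) ≤ b - 1 := by rw [hplen]; omega
    have hy2 : b - 1 < (parent.length : Int) := by rw [hplen]; omega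
    obtain ⟨U1, U2, U3, U4⟩ := union_spec parent rank hGood hx1 hx2 hy1 hy2
    have hwa : wrapIdx parent.length (a - 1) = wrapIdx n (a - 1) := by rw [hplen]
    have hwb : wrapIdx parent.length (b - 1) = wrapIdx n (b - 1) := by rw [hplen]
    rw [hwa, hwb] at U3 U4
    have hua : wrapIdx n (a - 1) < n := by unfold wrapIdx; split_ifs <;> omega
    have hub : wrapIdx n (b - 1) < n := by unfold wrapIdx; split_ifs <;> omega
    have hca : PySem.List.pyGetD comp (a - 1) 0 = comp.getD (wrapIdx n (a - 1)) 0 := by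
      rw [pyGetD_wrap comp _ _ (by rw [hclen]; omega) (by rw [hclen]; omega), hclen]
    have hcb : PySem.List.pyGetD comp (b - 1) 0 = comp.getD (wrapIdx n (b - 1)) 0 := by
      rw [pyGetD_wrap comp _ _ (by rw [hclen]; omega) (by rw [hclen]; omega), hclen]
    have hkey : (rootN parent (wrapIdx n (a - 1)) = rootN parent (wrapIdx n (b - 1))) ↔
        comp.getD (wrapIdx n (a - 1)) 0 = comp.getD (wrapIdx n (b - 1)) 0 := hrel _ _ hua hub
    simp only [List.foldl_cons, ufStep, compStep, hca, hcb]
    by_cases hcc : comp.getD (wrapIdx n (a - 1)) 0 = comp.getD (wrapIdx n (b - 1)) 0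
    · have hbb : (ufUnion parent rank (a - 1) (b - 1)).2.2 = false := by
        rw [U3]
        simp [hkey.mpr hcc]
      rw [hbb, if_pos hcc]
      apply ih _ _ _ _ _ hrest
      refine ⟨by rw [U1, hplen], hclen, U2, ?_⟩
      intro z w hz hw
      rw [U4 z w (by omega) (by omega)]
      have hre : rootN parent (wrapIdx n (a - 1)) = rootN parent (wrapIdx n (b - 1)) :=
        hkey.mpr hcc
      have I1 := hrel z w hz hw
      have I2 := hrel z _ hz hua
      have I3 := hrel z _ hz hub
      have I4 := hrel w _ hw hua
      have I5 := hrel w _ hw hub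
      constructor
      · intro hc
        rcases hc with hc | ⟨hc1, hc2⟩
        · exact I1.mp hc
        · rcases hc1 with hc1 | hc1 <;> rcases hc2 with hc2 | hc2 <;>
            first
              | exact I1.mp (hc1.trans hc2.symm)
              | exact I1.mp (by rw [hc1, hc2, hre])
      · intro hc
        exact Or.inl (I1.mpr hc)
    · have hbb : (ufUnion parent rank (a - 1) (b - 1)).2.2 = true := by
        rw [U3]
        simp only [decide_eq_true_eq]
        intro hc
        exact hcc (hkey.mp hc)
      rw [hbb, if_neg hcc]
      apply ih _ _ _ _ _ hrest
      have hmap : ∀ z, z < n →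
          (comp.map (fun cv => if cv = comp.getD (wrapIdx n (b - 1)) 0
              then comp.getD (wrapIdx n (a - 1)) 0 else cv)).getD z 0 =
            if comp.getD z 0 = comp.getD (wrapIdx n (b - 1)) 0
              then comp.getD (wrapIdx n (a - 1)) 0 else comp.getD z 0 := by
        intro z hz
        have hzc : z < comp.length := by omega
        rw [List.getD_eq_getElem?_getD, List.getElem?_map,
          List.getElem?_eq_getElem hzc]
        simp [List.getD_eq_getElem?_getD, List.getElem?_eq_getElem hzc]
      refine ⟨by rw [U1, hplen], by simp [hclen], U2, ?_⟩
      intro z w hz hw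
      rw [U4 z w (by omega) (by omega), hmap z hz, hmap w hw,
        merge_ite_iff (fun hc => hcc (by rw [hc])) _ _]
      have I1 := hrel z w hz hw
      have I2 := hrel z _ hz hua
      have I3 := hrel z _ hz hub
      have I4 := hrel w _ hw hua
      have I5 := hrel w _ hw hub
      exact or_congr I1 (and_congr (or_congr I2 I3) (or_congr I4 I5))

lemma init_inv (N : Int) (h : 0 ≤ N) : InvAB N.toNat (PySem.List.pyRange 0 N 1) (PySem.List.pyRange 0 N 1) := by
  have hlen : (PySem.List.pyRange 0 N 1).length = N.toNat := by
    rw [PySem.List.length_pyRange_one]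
    omega
  have hget : ∀ i, i < N.toNat → (PySem.List.pyRange 0 N 1).getD i 0 = (i : Int) := by
    intro i hi
    rw [List.getD_eq_getElem?_getD, List.getElem?_eq_getElem (by omega)]
    rw [PySem.List.getElem_pyRange_one]
    simp
  have hstp : ∀ i, i < N.toNat → stp (PySem.List.pyRange 0 N 1) i = i := by
    intro i hi
    unfold stp
    rw [hget i hi]
    omega
  have hV : ValidUF (PySem.List.pyRange 0 N 1) := by
    intro i hi
    rw [hlen] at hi
    rw [hget i hi, hlen]
    omega
  have hroot : ∀ i, i < N.toNat → rootN (PySem.List.pyRange 0 N 1) i = i := by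
    intro i hi
    exact rootGo_fixed _ (hstp i hi) _
  refine ⟨hlen, hlen, ⟨hV, fun _ => 0, ?_⟩, ?_⟩
  · intro i hi hne
    rw [hlen] at hi
    exact absurd (hstp i hi) hne
  · intro z w hz hw
    rw [hroot z hz, hroot w hw, hget z hz, hget w hw]
    constructor
    · intro hc; rw [hc]
    · intro hc; exact_mod_cast hc

-- ===== VERDICT (by name: the statement is the Claim_ definition above) =====
theorem minimum_edges_to_remove_spec : Claim_equal_minimum_edges_to_remove := by
  intro N M edges _ hPre
  unfold Spec_minimum_edges_to_remove minimum_edges_to_remove minimum_edges_to_remove_alt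
  by_cases hN : 0 ≤ N
  · apply loop_eq N.toNat edges _ _ _ 0 (init_inv N hN)
    intro e he
    have hcast : ((N.toNat : Nat) : Int) = N := Int.toNat_of_nonneg hN
    rw [hcast]
    exact hPre e he
  · -- N < 0: the bounds are unsatisfiable, so edges = [] and both sides return 0
    cases edges with
    | nil => rfl
    | cons e rest =>
      obtain ⟨⟨hb1, hb2⟩, _⟩ := hPre e List.mem_cons_self
      omega
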